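-- pv_equiv track=rewrite | github.com/NREL/SAM | samples/CSP/sco2_analysis_python_V2/example/design_point_tools.py | combine_dict_by_key
-- ===== SOURCE A (Python) =====
-- def combine_dict_by_key(result_dict_list, key_name, key_value):
--
--     # Create a new dict formed from the list of dicts that have the specific key value
--     return_dict = {}
--     for dictionary in result_dict_list:
--         for key in dictionary:
--             if key in return_dict:
--                 pass
--             else:
--                 return_dict[key] = []
--
--
--     for result_dict in result_dict_list:
--         NVal = 0
--         for key in result_dict:
--             NVal = len(result_dict[key])
--             break
--
--         i = 0
--         for i in range(NVal):
--             val = result_dict[key_name][i]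
--             if(val == key_value):
--                 for key in result_dict:
--                     return_dict[key].append(result_dict[key][i])
--
--     is_restart = True
--     while(is_restart == True):
--         is_restart = False
--         for key in return_dict:
--             if(len(return_dict[key]) == 0):
--                 return_dict.pop(key)
--                 is_restart = True
--                 break
--
--
--
--
--     return return_dict
-- ===== SOURCE B (Python) =====
-- def combine_dict_by_key(result_dict_list, key_name, key_value):
--     # Column-major re-implementation: iterate over the ordered union of keys and
--     # gather each output column directly from the dicts that contain that key,
--     # instead of A's row-by-row appends plus a restart-while purge.
--     out = {}
--     for key in dict.fromkeys(k for d in result_dict_list for k in d):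
--         col = []
--         for d in result_dict_list:
--             if key in d:
--                 n = len(next(iter(d.values()), []))
--                 col += [d[key][i] for i in range(n) if d[key_name][i] == key_value]
--         if col:
--             out[key] = col
--     return out
-- ===== Notes on version B (the rewrite author's own statement) =====
-- stated objective: alternative
-- what changed: B is column-major: it iterates over the ordered union of keys and builds each output column directly by scanning the dicts that contain that key, emitting a column only if non-empty, instead of A's row-major pass that appends matching rows to every column at once and then purges empty columns with a pop-and-restart while loop.
import Mathlib
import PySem

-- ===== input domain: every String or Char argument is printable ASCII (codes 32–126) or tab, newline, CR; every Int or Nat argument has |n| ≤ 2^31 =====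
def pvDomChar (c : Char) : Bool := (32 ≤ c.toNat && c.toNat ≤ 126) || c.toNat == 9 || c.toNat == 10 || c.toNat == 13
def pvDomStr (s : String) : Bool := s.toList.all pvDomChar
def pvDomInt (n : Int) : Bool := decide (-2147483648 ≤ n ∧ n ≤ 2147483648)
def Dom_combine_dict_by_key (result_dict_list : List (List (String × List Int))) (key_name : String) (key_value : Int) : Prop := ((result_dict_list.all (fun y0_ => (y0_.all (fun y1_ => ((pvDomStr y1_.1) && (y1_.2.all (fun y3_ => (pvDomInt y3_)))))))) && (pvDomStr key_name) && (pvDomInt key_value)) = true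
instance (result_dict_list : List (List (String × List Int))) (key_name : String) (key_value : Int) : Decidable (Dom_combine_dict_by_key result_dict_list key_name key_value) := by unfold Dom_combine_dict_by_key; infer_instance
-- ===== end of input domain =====

-- B is column-major: it iterates over the ordered union of keys and gathers each
-- output column directly from the dicts containing that key, emitting it only if
-- non-empty — instead of A's row-major appends plus restart-while purge
-- (objective: alternative; same return value).

-- ===== PORT A =====
-- 'for key in result_dict: NVal = len(result_dict[key]); break' — length of the first
-- key's value list (0 for an empty dict); both Pythons compute NVal by this loop.
def pvFirstLen (d : PySem.Dict String (List Int)) : Nat :=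
  match d.items with
  | [] => 0
  | (_, v) :: _ => v.length

-- termination helper for the restart-while: popping a present key shrinks the dict
theorem pvEraseLt (d : PySem.Dict String (List Int)) (k : String) (h : k ∈ d.keys) :
    (d.erase k).items.length < d.items.length := by
  simp only [PySem.Dict.keys, List.mem_map] at h
  obtain ⟨p, hp, hk⟩ := h
  simp only [PySem.Dict.erase]
  exact List.length_filter_lt_length_iff_exists.mpr ⟨p, hp, by simp [hk]⟩

-- the restart-while: scan keys for the first empty column, pop it, restart; stop when none
def purgeA (d : PySem.Dict String (List Int)) : PySem.Dict String (List Int) :=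
  match h : d.keys.find? (fun key => (d.getD key []).length == 0) with
  | some key => purgeA (d.erase key)
  | none => d
termination_by d.items.length
decreasing_by exact pvEraseLt d key (List.mem_of_find?_eq_some h)

def combine_dict_by_key (result_dict_list : List (List (String × List Int))) (key_name : String) (key_value : Int) : List (String × List Int) :=
  -- first loop: return_dict[key] = [] for every key of every dict, first occurrence wins
  let return_dict : PySem.Dict String (List Int) :=
    result_dict_list.foldl (fun rd dictionary =>
      (PySem.Dict.ofList dictionary).keys.foldl
        (fun rd key => if rd.contains key then rd else rd.insert key []) rd)
      PySem.Dict.empty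
  -- second loop: for each row index i of each dict, on a key_value match append every
  -- column's entry; Pre_ guarantees key_name is present and i in range, so the
  -- getD/pyGetD defaults are never observed on admitted inputs
  let return_dict :=
    result_dict_list.foldl (fun rd rdict =>
      let d := PySem.Dict.ofList rdict
      let NVal := pvFirstLen d
      (PySem.List.pyRange 0 (NVal : Int) 1).foldl (fun rd i =>
        let val := PySem.List.pyGetD (d.getD key_name []) i 0
        if val = key_value then
          d.keys.foldl (fun rd key =>
            rd.modify key [] (fun col => col ++ [PySem.List.pyGetD (d.getD key []) i 0])) rd
        else rd) rd) return_dict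
  (purgeA return_dict).items

-- ===== PORT B =====
def combine_dict_by_key_alt (result_dict_list : List (List (String × List Int))) (key_name : String) (key_value : Int) : List (String × List Int) :=
  -- ordered union of keys (dict.fromkeys over all keys in order)
  let keys : PySem.Set String :=
    PySem.Set.ofList (result_dict_list.flatMap (fun d => (PySem.Dict.ofList d).keys))
  -- column-major gather: for each key, scan the dicts that contain it
  let out : PySem.Dict String (List Int) :=
    keys.foldl (fun out key =>
      let col := result_dict_list.foldl (fun col dl =>
        let d := PySem.Dict.ofList dl
        if d.contains key then
          let n := pvFirstLen d
          col ++ ((PySem.List.pyRange 0 (n : Int) 1).filter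
              (fun i => PySem.List.pyGetD (d.getD key_name []) i 0 == key_value)).map
            (fun i => PySem.List.pyGetD (d.getD key []) i 0)
        else col) []
      if col.isEmpty then out else out.insert key col) PySem.Dict.empty
  out.items

-- ===== PRECONDITION & SPEC =====
-- Pre_ excludes exactly the inputs on which the Python A raises: a non-empty dict whose
-- first column is non-empty must contain key_name (else KeyError), key_name's column must
-- cover every scanned row index, and every matching row index must be in range for every
-- column of that dict (else IndexError).
def Pre_combine_dict_by_key (result_dict_list : List (List (String × List Int))) (key_name : String) (key_value : Int) : Prop :=
  ∀ dl ∈ result_dict_list,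
    pvFirstLen (PySem.Dict.ofList dl) = 0 ∨
    ((PySem.Dict.ofList dl).contains key_name = true ∧
     pvFirstLen (PySem.Dict.ofList dl) ≤ ((PySem.Dict.ofList dl).getD key_name []).length ∧
     ∀ i ∈ List.range (pvFirstLen (PySem.Dict.ofList dl)),
       ((PySem.Dict.ofList dl).getD key_name []).getD i 0 = key_value →
       ∀ k ∈ (PySem.Dict.ofList dl).keys, i < ((PySem.Dict.ofList dl).getD k []).length)
instance (result_dict_list : List (List (String × List Int))) (key_name : String) (key_value : Int) : Decidable (Pre_combine_dict_by_key result_dict_list key_name key_value) := by unfold Pre_combine_dict_by_key; infer_instance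

def pvWitness_combine_dict_by_key : (List (List (String × List Int))) × String × Int :=
  ([[("k", [1, 2]), ("a", [5, 6])], []], "k", 1)

def Spec_combine_dict_by_key (result_dict_list : List (List (String × List Int))) (key_name : String) (key_value : Int) (out : List (String × List Int)) : Prop := out = combine_dict_by_key_alt result_dict_list key_name key_value
instance (result_dict_list : List (List (String × List Int))) (key_name : String) (key_value : Int) (out : List (String × List Int)) : Decidable (Spec_combine_dict_by_key result_dict_list key_name key_value out) := by unfold Spec_combine_dict_by_key; infer_instance

-- ===== CLAIM (what is proved, stated in full; the proofs are below) =====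
def Claim_equal_combine_dict_by_key : Prop := ∀ (result_dict_list : List (List (String × List Int))) (key_name : String) (key_value : Int), Dom_combine_dict_by_key result_dict_list key_name key_value → Pre_combine_dict_by_key result_dict_list key_name key_value → Spec_combine_dict_by_key result_dict_list key_name key_value (combine_dict_by_key result_dict_list key_name key_value)

-- ===== LEMMAS AND PROOFS =====

-- the values a single dict contributes to column k (empty when it lacks k)
def pvMvals (dl : List (String × List Int)) (key_name : String) (key_value : Int) (k : String) : List Int :=
  ((PySem.List.pyRange 0 ((pvFirstLen (PySem.Dict.ofList dl)) : Int) 1).filter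
      (fun i => PySem.List.pyGetD ((PySem.Dict.ofList dl).getD key_name []) i 0 == key_value)).map
    (fun i => PySem.List.pyGetD ((PySem.Dict.ofList dl).getD k []) i 0)

-- the final column of key k
def pvExt (L : List (List (String × List Int))) (key_name : String) (key_value : Int) (k : String) : List Int :=
  L.flatMap (fun dl => if (PySem.Dict.ofList dl).contains k then pvMvals dl key_name key_value k else [])

-- ---- phase 1 of A (contains/else-insert fold): keys and values ----
theorem pvP1KeysOne (ks : List String) : ∀ c : PySem.Dict String (List Int),
    (ks.foldl (fun rd key => if rd.contains key then rd else rd.insert key []) c).keys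
      = PySem.Set.update c.keys ks := by
  induction ks with
  | nil => intro c; rfl
  | cons k ks ih =>
    intro c
    rw [List.foldl_cons, PySem.Set.update_cons, ih]
    congr 1
    cases hb : c.contains k
    · simp only [Bool.false_eq_true, if_false]
      rw [PySem.Dict.keys_insert_of_not_contains c [] hb,
        PySem.Set.add_of_not_mem (fun hm => by simp [(PySem.Dict.contains_iff_mem_keys _ _).mpr hm] at hb)]
    · simp only [if_true]
      rw [PySem.Set.add_of_mem ((PySem.Dict.contains_iff_mem_keys _ _).mp hb)]

theorem pvP1Keys (L : List (List (String × List Int))) : ∀ c : PySem.Dict String (List Int),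
    (L.foldl (fun rd dictionary => (PySem.Dict.ofList dictionary).keys.foldl
      (fun rd key => if rd.contains key then rd else rd.insert key []) rd) c).keys
      = PySem.Set.update c.keys (L.flatMap (fun dl => (PySem.Dict.ofList dl).keys)) := by
  induction L with
  | nil => intro c; simp [PySem.Set.update_nil]
  | cons dl L ih =>
    intro c
    rw [List.foldl_cons, List.flatMap_cons, PySem.Set.update_append, ih, pvP1KeysOne]

theorem pvP1GetDOne (ks : List String) : ∀ c : PySem.Dict String (List Int),
    (∀ k, c.getD k [] = []) → ∀ k,
    (ks.foldl (fun rd key => if rd.contains key then rd else rd.insert key []) c).getD k [] = [] := by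
  induction ks with
  | nil => intro c h k; exact h k
  | cons k' ks ih =>
    intro c h k
    rw [List.foldl_cons]
    cases hb : c.contains k'
    · simp only [Bool.false_eq_true, if_false]
      refine ih _ ?_ k
      intro k0
      rw [PySem.Dict.getD_insert]
      split <;> simp [h k0]
    · simp only [if_true]; exact ih _ h k

theorem pvP1GetD (L : List (List (String × List Int))) : ∀ c : PySem.Dict String (List Int),
    (∀ k, c.getD k [] = []) → ∀ k,
    (L.foldl (fun rd dictionary => (PySem.Dict.ofList dictionary).keys.foldl
      (fun rd key => if rd.contains key then rd else rd.insert key []) rd) c).getD k [] = [] := by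
  induction L with
  | nil => intro c h k; exact h k
  | cons dl L ih => intro c h k; exact ih _ (pvP1GetDOne _ _ h) k

-- ---- phase 2 of A: getD characterisation and key preservation ----
-- a fold of per-key appends (ks nodup): each listed key gains its element once
theorem pvM1 (ks : List String) (g : String → List Int) (hnd : ks.Nodup) :
    ∀ (rd : PySem.Dict String (List Int)) (k : String),
    (ks.foldl (fun rd key => rd.modify key [] (fun col => col ++ g key)) rd).getD k []
      = if k ∈ ks then rd.getD k [] ++ g k else rd.getD k [] := by
  induction ks with
  | nil => intro rd k; simp
  | cons k' ks ih =>
    intro rd k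
    rw [List.foldl_cons, ih (List.nodup_cons.mp hnd).2, PySem.Dict.getD_modify]
    by_cases hk : k = k'
    · subst hk
      have hkn : k ∉ ks := (List.nodup_cons.mp hnd).1
      simp [hkn]
    · by_cases hm : k ∈ ks <;> simp [hk, hm]

theorem pvM1Keys (ks : List String) (g : String → List Int)
    (rd : PySem.Dict String (List Int)) (hsub : ∀ k ∈ ks, k ∈ rd.keys) :
    (ks.foldl (fun rd key => rd.modify key [] (fun col => col ++ g key)) rd).keys = rd.keys := by
  rw [PySem.Dict.keys_foldl_modify, PySem.Set.update_eq_append_filter]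
  have : (PySem.Set.ofList ks).filter (fun y => !(PySem.Set.contains rd.keys y)) = [] := by
    rw [List.filter_eq_nil_iff]
    intro a ha
    have hm : a ∈ rd.keys := hsub a ((PySem.Set.mem_ofList _ _).mp ha)
    simpa using hm
  rw [this, List.append_nil]

-- the per-dict row loop of A: column k gains that dict's matched values (if k is a key)
theorem pvM2 (ks : List String) (hnd : ks.Nodup) (p : Int → Bool) (g : String → Int → Int)
    (l : List Int) : ∀ (rd : PySem.Dict String (List Int)) (k : String),
    (l.foldl (fun rd i =>
        if p i = true then
          ks.foldl (fun rd key => rd.modify key [] (fun col => col ++ [g key i])) rd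
        else rd) rd).getD k []
      = rd.getD k [] ++ (if k ∈ ks then ((l.filter p).map fun i => g k i) else []) := by
  induction l with
  | nil => intro rd k; by_cases hm : k ∈ ks <;> simp [hm]
  | cons i l ih =>
    intro rd k
    rw [List.foldl_cons]
    cases hp : p i
    · simp only [Bool.false_eq_true, if_false]
      rw [ih]
      simp [hp]
    · simp only [if_true]
      rw [ih, pvM1 ks _ hnd]
      by_cases hm : k ∈ ks <;> simp [hm, hp]

theorem pvM2Keys (ks : List String) (p : Int → Bool) (g : String → Int → Int)
    (l : List Int) : ∀ (rd : PySem.Dict String (List Int)), (∀ k ∈ ks, k ∈ rd.keys) →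
    (l.foldl (fun rd i =>
        if p i = true then
          ks.foldl (fun rd key => rd.modify key [] (fun col => col ++ [g key i])) rd
        else rd) rd).keys = rd.keys := by
  induction l with
  | nil => intro rd _; rfl
  | cons i l ih =>
    intro rd hsub
    rw [List.foldl_cons]
    cases hp : p i
    · simp only [Bool.false_eq_true, if_false]; exact ih rd hsub
    · simp only [if_true]
      have hk := pvM1Keys ks (fun key => [g key i]) rd hsub
      rw [ih _ (by rw [hk]; exact hsub), hk]

-- A's whole second loop, per column
theorem pvP2GetD (key_name : String) (key_value : Int) (L : List (List (String × List Int))) :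
    ∀ c : PySem.Dict String (List Int),
    (∀ dl ∈ L, ∀ k ∈ (PySem.Dict.ofList dl).keys, k ∈ c.keys) → ∀ k,
    (L.foldl (fun rd rdict =>
      (PySem.List.pyRange 0 ((pvFirstLen (PySem.Dict.ofList rdict)) : Int) 1).foldl (fun rd i =>
        if PySem.List.pyGetD ((PySem.Dict.ofList rdict).getD key_name []) i 0 = key_value then
          (PySem.Dict.ofList rdict).keys.foldl (fun rd key =>
            rd.modify key [] (fun col => col ++ [PySem.List.pyGetD ((PySem.Dict.ofList rdict).getD key []) i 0])) rd
        else rd) rd) c).getD k []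
      = c.getD k [] ++ pvExt L key_name key_value k := by
  induction L with
  | nil => intro c _ k; simp [pvExt]
  | cons dl L ih =>
    intro c hsub k
    rw [List.foldl_cons]
    have hstep : ∀ (rd : PySem.Dict String (List Int)),
        ((PySem.List.pyRange 0 ((pvFirstLen (PySem.Dict.ofList dl)) : Int) 1).foldl (fun rd i =>
          if PySem.List.pyGetD ((PySem.Dict.ofList dl).getD key_name []) i 0 = key_value then
            (PySem.Dict.ofList dl).keys.foldl (fun rd key =>
              rd.modify key [] (fun col => col ++ [PySem.List.pyGetD ((PySem.Dict.ofList dl).getD key []) i 0])) rd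
          else rd) rd)
        = ((PySem.List.pyRange 0 ((pvFirstLen (PySem.Dict.ofList dl)) : Int) 1).foldl (fun rd i =>
          if ((fun i => PySem.List.pyGetD ((PySem.Dict.ofList dl).getD key_name []) i 0 == key_value) i) = true then
            (PySem.Dict.ofList dl).keys.foldl (fun rd key =>
              rd.modify key [] (fun col => col ++ [PySem.List.pyGetD ((PySem.Dict.ofList dl).getD key []) i 0])) rd
          else rd) rd) := by
      intro rd
      apply PySem.List.foldl_congr_mem
      intro acc x _
      simp only [beq_iff_eq]
    rw [hstep]
    have hkeys := pvM2Keys (PySem.Dict.ofList dl).keys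
      (fun i => PySem.List.pyGetD ((PySem.Dict.ofList dl).getD key_name []) i 0 == key_value)
      (fun key i => PySem.List.pyGetD ((PySem.Dict.ofList dl).getD key []) i 0)
      (PySem.List.pyRange 0 ((pvFirstLen (PySem.Dict.ofList dl)) : Int) 1)
      c (hsub dl List.mem_cons_self)
    rw [ih _ (by intro dl' hdl' k' hk'; rw [hkeys]; exact hsub dl' (List.mem_cons_of_mem _ hdl') k' hk') k,
      pvM2 (PySem.Dict.ofList dl).keys (PySem.Dict.nodup_keys_ofList dl)
        (fun i => PySem.List.pyGetD ((PySem.Dict.ofList dl).getD key_name []) i 0 == key_value)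
        (fun key i => PySem.List.pyGetD ((PySem.Dict.ofList dl).getD key []) i 0)
        (PySem.List.pyRange 0 ((pvFirstLen (PySem.Dict.ofList dl)) : Int) 1) c k]
    simp only [pvExt, List.flatMap_cons, pvMvals, ← List.append_assoc]
    congr 2
    by_cases hm : k ∈ (PySem.Dict.ofList dl).keys
    · rw [if_pos hm, if_pos ((PySem.Dict.contains_iff_mem_keys _ _).mpr hm)]
    · rw [if_neg hm, if_neg (by simp [PySem.Dict.contains_iff_mem_keys, hm])]

theorem pvP2Keys (key_name : String) (key_value : Int) (L : List (List (String × List Int))) :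
    ∀ c : PySem.Dict String (List Int),
    (∀ dl ∈ L, ∀ k ∈ (PySem.Dict.ofList dl).keys, k ∈ c.keys) →
    (L.foldl (fun rd rdict =>
      (PySem.List.pyRange 0 ((pvFirstLen (PySem.Dict.ofList rdict)) : Int) 1).foldl (fun rd i =>
        if PySem.List.pyGetD ((PySem.Dict.ofList rdict).getD key_name []) i 0 = key_value then
          (PySem.Dict.ofList rdict).keys.foldl (fun rd key =>
            rd.modify key [] (fun col => col ++ [PySem.List.pyGetD ((PySem.Dict.ofList rdict).getD key []) i 0])) rd
        else rd) rd) c).keys = c.keys := by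
  induction L with
  | nil => intro c _; rfl
  | cons dl L ih =>
    intro c hsub
    rw [List.foldl_cons]
    have hstep : ∀ (rd : PySem.Dict String (List Int)), (∀ k ∈ (PySem.Dict.ofList dl).keys, k ∈ rd.keys) →
        ((PySem.List.pyRange 0 ((pvFirstLen (PySem.Dict.ofList dl)) : Int) 1).foldl (fun rd i =>
          if PySem.List.pyGetD ((PySem.Dict.ofList dl).getD key_name []) i 0 = key_value then
            (PySem.Dict.ofList dl).keys.foldl (fun rd key =>
              rd.modify key [] (fun col => col ++ [PySem.List.pyGetD ((PySem.Dict.ofList dl).getD key []) i 0])) rd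
          else rd) rd).keys = rd.keys := by
      intro rd hs
      have := pvM2Keys (PySem.Dict.ofList dl).keys
        (fun i => PySem.List.pyGetD ((PySem.Dict.ofList dl).getD key_name []) i 0 == key_value)
        (fun key i => PySem.List.pyGetD ((PySem.Dict.ofList dl).getD key []) i 0)
        (PySem.List.pyRange 0 ((pvFirstLen (PySem.Dict.ofList dl)) : Int) 1) rd hs
      rw [← this]
      apply congrArg
      apply PySem.List.foldl_congr_mem
      intro acc x _
      simp only [beq_iff_eq]
    have h1 := hstep c (hsub dl List.mem_cons_self)
    rw [ih _ (by intro dl' hdl' k' hk'; rw [h1]; exact hsub dl' (List.mem_cons_of_mem _ hdl') k' hk'), h1]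

-- the restart-while removes exactly the empty columns, keeping order
theorem pvPurgeItems (n : Nat) :
    ∀ d : PySem.Dict String (List Int), d.items.length ≤ n → d.keys.Nodup →
    (purgeA d).items = d.items.filter (fun p => !(p.2.length == 0)) := by
  induction n with
  | zero =>
    intro d hlen hnd
    have hnil : d.items = [] := List.eq_nil_of_length_eq_zero (Nat.le_zero.mp hlen)
    rw [purgeA]
    split
    · rename_i key heq
      have := List.mem_of_find?_eq_some heq
      simp [PySem.Dict.keys, hnil] at this
    · simp [hnil]
  | succ n ih =>
    intro d hlen hnd
    rw [purgeA]
    split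
    · rename_i key heq
      have hkmem := List.mem_of_find?_eq_some heq
      have hlt := pvEraseLt d key hkmem
      have hnd' : (d.erase key).keys.Nodup := by
        simp only [PySem.Dict.erase, PySem.Dict.keys] at *
        exact hnd.sublist (List.filter_sublist.map _)
      rw [ih (d.erase key) (by omega) hnd']
      simp only [PySem.Dict.erase]
      rw [List.filter_filter]
      apply List.filter_congr
      intro p hp
      by_cases e : p.1 = key
      · have hpred := List.find?_some heq
        have hv : d.getD key [] = p.2 := by
          refine PySem.Dict.getD_of_mem_items d ?_ hnd []
          rw [← e]; exact hp
        rw [hv] at hpred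
        have hlen0 : p.2.length = 0 := by simpa using hpred
        simp [e, hlen0]
      · simp [e]
    · rename_i heq
      symm
      apply List.filter_eq_self.mpr
      intro p hp
      have hkm : p.1 ∈ d.keys := by
        simp only [PySem.Dict.keys]
        exact List.mem_map_of_mem hp
      have := List.find?_eq_none.mp heq p.1 hkm
      have hv : d.getD p.1 [] = p.2 := PySem.Dict.getD_of_mem_items d hp hnd []
      rw [hv] at this
      simpa using this

-- ---- B side: the inner scan is pvExt, the outer fold builds the filtered item list ----
theorem pvBCol (key_name : String) (key_value : Int) (k : String)
    (L : List (List (String × List Int))) : ∀ acc : List Int,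
    (L.foldl (fun col dl =>
        if (PySem.Dict.ofList dl).contains k then
          col ++ ((PySem.List.pyRange 0 ((pvFirstLen (PySem.Dict.ofList dl)) : Int) 1).filter
              (fun i => PySem.List.pyGetD ((PySem.Dict.ofList dl).getD key_name []) i 0 == key_value)).map
            (fun i => PySem.List.pyGetD ((PySem.Dict.ofList dl).getD k []) i 0)
        else col) acc)
      = acc ++ pvExt L key_name key_value k := by
  induction L with
  | nil => intro acc; simp [pvExt]
  | cons dl L ih =>
    intro acc
    rw [List.foldl_cons]
    cases hb : (PySem.Dict.ofList dl).contains k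
    · simp only [Bool.false_eq_true, if_false]
      rw [ih]
      simp [pvExt, hb]
    · simp only [if_true]
      rw [ih]
      simp [pvExt, pvMvals, hb, List.append_assoc]

theorem pvBItems (h : String → List Int) (ks : List String) (hnd : ks.Nodup) :
    ∀ out : PySem.Dict String (List Int), (∀ k ∈ ks, out.contains k = false) →
    (ks.foldl (fun out key => if (h key).isEmpty then out else out.insert key (h key)) out).items
      = out.items ++ (ks.filter (fun k => !(h k).isEmpty)).map (fun k => (k, h k)) := by
  induction ks with
  | nil => intro out _; simp
  | cons k ks ih =>
    intro out hfresh
    rw [List.foldl_cons, List.filter_cons]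
    cases hb : (h k).isEmpty
    · simp only [Bool.false_eq_true, if_false, Bool.not_false, if_true, List.map_cons]
      rw [ih (List.nodup_cons.mp hnd).2 _ ?_,
        PySem.Dict.items_insert_of_not_contains _ _ (hfresh k List.mem_cons_self)]
      · simp
      · intro k' hk'
        rw [PySem.Dict.contains_insert]
        have : k' ≠ k := fun e => (List.nodup_cons.mp hnd).1 (e ▸ hk')
        simp [this, hfresh k' (List.mem_cons_of_mem _ hk')]
    · simp only [if_true, Bool.not_true, Bool.false_eq_true, if_false]
      exact ih (List.nodup_cons.mp hnd).2 _ (fun k' hk' => hfresh k' (List.mem_cons_of_mem _ hk'))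

-- ===== VERDICT (by name: the statement is the Claim_ definition above) =====
theorem combine_dict_by_key_spec : Claim_equal_combine_dict_by_key := by
  intro L key_name key_value _hdom _hpre
  unfold Spec_combine_dict_by_key
  simp only [combine_dict_by_key, combine_dict_by_key_alt]
  -- notation
  set U : List String := PySem.Set.ofList (L.flatMap (fun dl => (PySem.Dict.ofList dl).keys)) with hU
  -- phase-1 dict of A
  set c1 : PySem.Dict String (List Int) :=
    L.foldl (fun rd dictionary => (PySem.Dict.ofList dictionary).keys.foldl
      (fun rd key => if rd.contains key then rd else rd.insert key []) rd) PySem.Dict.empty with hc1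
  have hc1keys : c1.keys = U := by
    rw [hc1, pvP1Keys, hU]
    simp [PySem.Dict.keys, PySem.Dict.empty, PySem.Set.update_nil_left]
  have hc1get : ∀ k, c1.getD k [] = [] := by
    intro k
    rw [hc1]
    exact pvP1GetD L PySem.Dict.empty (by intro k0; simp [PySem.Dict.getD_empty]) k
  have hsub : ∀ dl ∈ L, ∀ k ∈ (PySem.Dict.ofList dl).keys, k ∈ c1.keys := by
    intro dl hdl k hk
    rw [hc1keys, hU]
    exact (PySem.Set.mem_ofList _ _).mpr (List.mem_flatMap.mpr ⟨dl, hdl, hk⟩)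
  -- phase-2 dict of A
  set c2 : PySem.Dict String (List Int) :=
    L.foldl (fun rd rdict =>
      (PySem.List.pyRange 0 ((pvFirstLen (PySem.Dict.ofList rdict)) : Int) 1).foldl (fun rd i =>
        if PySem.List.pyGetD ((PySem.Dict.ofList rdict).getD key_name []) i 0 = key_value then
          (PySem.Dict.ofList rdict).keys.foldl (fun rd key =>
            rd.modify key [] (fun col => col ++ [PySem.List.pyGetD ((PySem.Dict.ofList rdict).getD key []) i 0])) rd
        else rd) rd) c1 with hc2
  have hc2keys : c2.keys = U := by rw [hc2, pvP2Keys key_name key_value L c1 hsub, hc1keys]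
  have hnodup : c2.keys.Nodup := by rw [hc2keys, hU]; exact PySem.Set.nodup_ofList _
  have hc2get : ∀ k, c2.getD k [] = pvExt L key_name key_value k := by
    intro k
    rw [hc2, pvP2GetD key_name key_value L c1 hsub k, hc1get k, List.nil_append]
  -- A's result
  rw [pvPurgeItems c2.items.length c2 le_rfl hnodup,
    PySem.Dict.items_eq_map_keys c2 hnodup [], hc2keys]
  have hA : ∀ k ∈ U, (k, c2.getD k []) = (k, pvExt L key_name key_value k) := by
    intro k _; rw [hc2get k]
  rw [List.map_congr_left hA, List.filter_map]
  -- B's result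
  have hBfresh : ∀ k ∈ U, (PySem.Dict.empty : PySem.Dict String (List Int)).contains k = false := by
    intro k _; simp [PySem.Dict.contains_empty]
  simp only [pvBCol, List.nil_append]
  rw [pvBItems (pvExt L key_name key_value) U (hU ▸ PySem.Set.nodup_ofList _) PySem.Dict.empty hBfresh]
  simp only [PySem.Dict.empty, List.nil_append]
  congr 1
  apply List.filter_congr
  intro k _
  simp only [Function.comp]
  cases hx : pvExt L key_name key_value k <;> simp
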